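-- pv_equiv track=rewrite | github.com/oso95/autoresearch-polymarket | src/runner/agent_runner.py | _infer_archetype
-- ===== SOURCE A (Python) =====
-- def _infer_archetype(agent_name: str) -> str:
--     suffix = agent_name.split("-", 2)[-1] if "-" in agent_name else agent_name
--     while True:
--         changed = False
--         for prefix in ("clone-", "mirror-"):
--             if suffix.startswith(prefix):
--                 suffix = suffix[len(prefix):]
--                 changed = True
--         if not changed:
--             break
--     return suffix
-- ===== SOURCE B (Python) =====
-- def _infer_archetype(agent_name: str) -> str:
--     # Tokenise once: full split on "-", skip the first (up to) two tokens,
--     # then advance past any leading "clone"/"mirror" tokens, and rejoin.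
--     parts = agent_name.split("-")
--     i = min(2, len(parts) - 1)
--     while i < len(parts) - 1 and parts[i] in ("clone", "mirror"):
--         i += 1
--     return "-".join(parts[i:])
-- ===== Notes on version B (the rewrite author's own statement) =====
-- stated objective: alternative
-- what changed: A repeatedly re-scans the string in a while-True fixed-point loop stripping 'clone-'/'mirror-' prefixes after a maxsplit-2 split; B splits the name on '-' once into tokens, advances an index past the first two tokens and any following 'clone'/'mirror' tokens (keeping the last token), and rejoins the tail in one pass.
import Mathlib
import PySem

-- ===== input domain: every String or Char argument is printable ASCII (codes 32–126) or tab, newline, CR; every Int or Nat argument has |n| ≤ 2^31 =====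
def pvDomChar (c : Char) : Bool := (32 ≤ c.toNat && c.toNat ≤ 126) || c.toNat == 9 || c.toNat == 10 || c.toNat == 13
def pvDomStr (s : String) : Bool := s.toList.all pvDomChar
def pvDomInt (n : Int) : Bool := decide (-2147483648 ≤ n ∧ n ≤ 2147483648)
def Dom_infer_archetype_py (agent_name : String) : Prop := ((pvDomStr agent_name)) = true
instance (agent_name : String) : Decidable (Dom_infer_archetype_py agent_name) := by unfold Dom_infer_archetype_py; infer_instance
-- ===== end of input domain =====

-- B replaces A's while-True fixed-point prefix-stripping loop (after a maxsplit-2 split) by a single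
-- full split on '-', an index walk over the tokens, and one join (objective: alternative, same result).

-- ===== PORT A =====

-- termination helper for the loop of A: stripping a nonempty matched prefix shortens the string
theorem pvStripLt (s pre : List Char) (k : Nat) (hk : pre.length = k)
    (h0 : 0 < k) (h : PySem.Chars.startswith s pre = true) :
    (PySem.Chars.slice s (some (k : Int)) none).length < s.length := by
  have hp : pre <+: s := (PySem.Chars.startswith_iff s pre).mp h
  have hl : k ≤ s.length := hk ▸ hp.length_le
  have : PySem.Chars.slice s (some (k : Int)) none = s.drop k := by
    simp [PySem.Chars.slice_eq_listSlice, PySem.List.slice_from_natCast]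
  rw [this, List.length_drop]
  omega

-- the while-True loop of A: one body pass tries "clone-" then "mirror-", repeats while changed
def aStrip (s : List Char) : List Char :=
  if h1 : PySem.Chars.startswith s "clone-".toList = true then
    let s1 := PySem.Chars.slice s (some 6) none
    if h2 : PySem.Chars.startswith s1 "mirror-".toList = true then
      aStrip (PySem.Chars.slice s1 (some 7) none)
    else
      aStrip s1
  else if h2 : PySem.Chars.startswith s "mirror-".toList = true then
    aStrip (PySem.Chars.slice s (some 7) none)
  else s
termination_by s.length
decreasing_by
  · exact lt_trans
      (pvStripLt _ "mirror-".toList 7 (by decide) (by decide) h2)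
      (by simpa using pvStripLt s "clone-".toList 6 (by decide) (by decide) h1)
  · simpa using pvStripLt s "clone-".toList 6 (by decide) (by decide) h1
  · simpa using pvStripLt s "mirror-".toList 7 (by decide) (by decide) h2

def infer_archetype_py (agent_name : String) : String :=
  let suffix : String :=
    if PySem.Str.isIn "-" agent_name = true then
      (PySem.List.pyGet? ((PySem.Str.splitMax? agent_name "-" 2).getD []) (-1)).getD ""
    else agent_name
  String.ofList (aStrip suffix.toList)

-- ===== PORT B =====

-- the index walk of B: advance i past leading "clone"/"mirror" tokens, never past the last token
def bWalk (parts : List String) (i : Nat) : Nat :=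
  if (decide (i < parts.length - 1) &&
      (parts.getD i "" == "clone" || parts.getD i "" == "mirror")) = true then
    bWalk parts (i + 1)
  else i
termination_by parts.length - i
decreasing_by simp at *; omega

def infer_archetype_py_alt (agent_name : String) : String :=
  let parts := (PySem.Str.split? agent_name "-").getD []
  let i := bWalk parts (min 2 (parts.length - 1))
  PySem.Str.join "-" (PySem.List.slice parts (some (i : Int)) none)

-- ===== PRECONDITION & SPEC =====
def Spec_infer_archetype_py (agent_name : String) (out : String) : Prop := out = infer_archetype_py_alt agent_name
instance (agent_name : String) (out : String) : Decidable (Spec_infer_archetype_py agent_name out) := by unfold Spec_infer_archetype_py; infer_instance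

-- ===== CLAIM (what is proved, stated in full; the proofs are below) =====
def Claim_equal_infer_archetype_py : Prop := ∀ (agent_name : String), Dom_infer_archetype_py agent_name → Spec_infer_archetype_py agent_name (infer_archetype_py agent_name)

-- ===== LEMMAS AND PROOFS =====

-- structural model of splitting on '-'
def splitAux : List Char → List (List Char)
  | [] => [[]]
  | c :: rest => if c = '-' then [] :: splitAux rest else (splitAux rest).modifyHead (c :: ·)

-- structural model of splitting on '-' with a maxsplit budget
def splitMaxAux : Nat → List Char → List (List Char)
  | 0, l => [l]
  | _ + 1, [] => [[]]
  | m + 1, c :: rest =>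
      if c = '-' then [] :: splitMaxAux m rest else (splitMaxAux (m + 1) rest).modifyHead (c :: ·)

-- model of what the stripping loop does on the token list
def advance : List (List Char) → List (List Char)
  | [] => []
  | [q] => [q]
  | q :: r :: t => if q = "clone".toList ∨ q = "mirror".toList then advance (r :: t) else q :: r :: t

theorem splitAux_ne_nil (l : List Char) : splitAux l ≠ [] := by
  induction l with
  | nil => simp [splitAux]
  | cons c rest ih =>
    simp only [splitAux]
    split
    · simp
    · cases h : splitAux rest with
      | nil => exact absurd h ih
      | cons p t => simp [List.modifyHead]

theorem join_splitAux (l : List Char) : PySem.Chars.join ['-'] (splitAux l) = l := by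
  induction l with
  | nil => simp [splitAux, PySem.Chars.join_singleton]
  | cons c rest ih =>
    simp only [splitAux]
    cases h2 : splitAux rest with
    | nil => exact absurd h2 (splitAux_ne_nil rest)
    | cons p t =>
      rw [h2] at ih
      by_cases hc : c = '-'
      · subst hc
        rw [if_pos rfl, PySem.Chars.join_cons_cons]
        simp [ih]
      · rw [if_neg hc, List.modifyHead_cons]
        cases t with
        | nil =>
          rw [PySem.Chars.join_singleton]
          rw [PySem.Chars.join_singleton] at ih
          rw [ih]
        | cons u t' =>
          rw [PySem.Chars.join_cons_cons]
          rw [PySem.Chars.join_cons_cons] at ih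
          simp at ih ⊢
          simp [ih]
theorem mem_splitAux_no_dash (l : List Char) (p : List Char) (hp : p ∈ splitAux l) : '-' ∉ p := by
  induction l generalizing p with
  | nil => simp [splitAux] at hp; simp [hp]
  | cons c rest ih =>
    simp only [splitAux] at hp
    by_cases hc : c = '-'
    · rw [if_pos hc] at hp
      rcases List.mem_cons.mp hp with hp | hp
      · simp [hp]
      · exact ih p hp
    · rw [if_neg hc] at hp
      cases h2 : splitAux rest with
      | nil => exact absurd h2 (splitAux_ne_nil rest)
      | cons q t =>
        rw [h2, List.modifyHead_cons] at hp
        rcases List.mem_cons.mp hp with hp | hp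
        · subst hp
          intro hmem
          rcases List.mem_cons.mp hmem with h | h
          · exact hc h.symm
          · exact ih q (h2 ▸ List.mem_cons_self) h
        · exact ih p (h2 ▸ List.mem_cons_of_mem _ hp)
theorem length_splitAux_eq_one_iff (l : List Char) : (splitAux l).length = 1 ↔ '-' ∉ l := by
  induction l with
  | nil => simp [splitAux]
  | cons c rest ih =>
    simp only [splitAux]
    by_cases hc : c = '-'
    · rw [if_pos hc]
      subst hc
      constructor
      · intro hl
        exfalso
        have : splitAux rest = [] := by
          cases h2 : splitAux rest with
          | nil => rfl
          | cons q t => rw [h2] at hl; simp at hl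
        exact splitAux_ne_nil rest this
      · intro hmem
        exact absurd (List.mem_cons_self) hmem
    · rw [if_neg hc]
      cases h2 : splitAux rest with
      | nil => exact absurd h2 (splitAux_ne_nil rest)
      | cons q t =>
        rw [List.modifyHead_cons]
        rw [h2] at ih
        constructor
        · intro hl
          intro hmem
          rcases List.mem_cons.mp hmem with h | h
          · exact hc h.symm
          · exact (ih.mp (by simpa using hl)) h
        · intro hmem
          have : '-' ∉ rest := fun h => hmem (List.mem_cons_of_mem _ h)
          simpa using ih.mpr this
theorem go_eq (fuel : Nat) : ∀ (l cur : List Char) (acc : List (List Char)), l.length ≤ fuel →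
    PySem.Chars.splitOn.go ['-'] fuel l cur acc =
      acc.reverse ++ (splitAux l).modifyHead (cur.reverse ++ ·) := by
  induction fuel with
  | zero =>
    intro l cur acc hl
    have : l = [] := by cases l <;> simp_all
    subst this
    simp [PySem.Chars.splitOn.go, splitAux, List.modifyHead]
  | succ f ih =>
    intro l cur acc hl
    cases l with
    | nil => simp [PySem.Chars.splitOn.go, splitAux, List.modifyHead]
    | cons c rest =>
      simp only [PySem.Chars.splitOn.go]
      by_cases hc : c = '-'
      · subst hc
        rw [if_pos (by simp [List.isPrefixOf])]
        rw [show List.drop ['-'].length ('-' :: rest) = rest from by simp]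
        rw [ih rest [] (cur.reverse :: acc) (by simpa using Nat.le_of_succ_le_succ hl)]
        cases h2 : splitAux rest with
        | nil => exact absurd h2 (splitAux_ne_nil rest)
        | cons q t => simp [splitAux, h2, List.modifyHead]
      · rw [if_neg (by simp [List.isPrefixOf]; intro h; exact hc h.symm)]
        rw [ih rest (c :: cur) acc (by simpa using Nat.le_of_succ_le_succ hl)]
        simp only [splitAux, if_neg hc]
        cases h2 : splitAux rest with
        | nil => exact absurd h2 (splitAux_ne_nil rest)
        | cons q t => simp [List.modifyHead]

theorem splitOn_eq (l : List Char) : PySem.Chars.splitOn l ['-'] = splitAux l := by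
  rw [PySem.Chars.splitOn, go_eq (l.length + 1) l [] [] (by omega)]
  cases h2 : splitAux l with
  | nil => exact absurd h2 (splitAux_ne_nil l)
  | cons q t => simp [List.modifyHead]

theorem splitMaxAux_ne_nil : ∀ (m : Nat) (l : List Char), splitMaxAux m l ≠ [] := by
  intro m l
  induction l generalizing m with
  | nil => cases m <;> simp [splitMaxAux]
  | cons c rest ih =>
    cases m with
    | zero => simp [splitMaxAux]
    | succ m' =>
      simp only [splitMaxAux]
      split
      · simp
      · cases h : splitMaxAux (m' + 1) rest with
        | nil => exact absurd h (ih (m' + 1))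
        | cons q t => simp [List.modifyHead]

theorem goMax_eq (fuel : Nat) : ∀ (m : Nat) (l cur : List Char) (acc : List (List Char)), l.length ≤ fuel →
    PySem.Chars.splitOnMax.go ['-'] fuel m l cur acc =
      acc.reverse ++ (splitMaxAux m l).modifyHead (cur.reverse ++ ·) := by
  induction fuel with
  | zero =>
    intro m l cur acc hl
    have : l = [] := by cases l <;> simp_all
    subst this
    cases m <;> simp [PySem.Chars.splitOnMax.go, splitMaxAux, List.modifyHead]
  | succ f ih =>
    intro m l cur acc hl
    cases l with
    | nil => cases m <;> simp [PySem.Chars.splitOnMax.go, splitMaxAux, List.modifyHead]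
    | cons c rest =>
      simp only [PySem.Chars.splitOnMax.go]
      cases m with
      | zero => simp [splitMaxAux, List.modifyHead]
      | succ m' =>
        rw [if_neg (by omega)]
        by_cases hc : c = '-'
        · subst hc
          rw [if_pos (by simp [List.isPrefixOf])]
          rw [show List.drop ['-'].length ('-' :: rest) = rest from by simp]
          rw [show m' + 1 - 1 = m' from by omega]
          rw [ih m' rest [] (cur.reverse :: acc) (by simpa using Nat.le_of_succ_le_succ hl)]
          cases h2 : splitMaxAux m' rest with
          | nil => exact absurd h2 (splitMaxAux_ne_nil m' rest)
          | cons q t => simp [splitMaxAux, h2, List.modifyHead]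
        · rw [if_neg (by simp [List.isPrefixOf]; intro h; exact hc h.symm)]
          rw [ih (m' + 1) rest (c :: cur) acc (by simpa using Nat.le_of_succ_le_succ hl)]
          simp only [splitMaxAux, if_neg hc]
          cases h2 : splitMaxAux (m' + 1) rest with
          | nil => exact absurd h2 (splitMaxAux_ne_nil (m' + 1) rest)
          | cons q t => simp [List.modifyHead]

theorem splitOnMax_eq (l : List Char) : PySem.Chars.splitOnMax l ['-'] 2 = splitMaxAux 2 l := by
  rw [PySem.Chars.splitOnMax, if_neg (by omega)]
  rw [goMax_eq (l.length + 1) _ l [] [] (by omega)]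
  cases h2 : splitMaxAux ((2 : Int).toNat) l with
  | nil => exact absurd h2 (splitMaxAux_ne_nil _ l)
  | cons q t => simp_all [List.modifyHead]

theorem splitMaxAux_eq (l : List Char) : ∀ (m : Nat),
    splitMaxAux m l = (splitAux l).take m ++
      (if m < (splitAux l).length then [PySem.Chars.join ['-'] ((splitAux l).drop m)] else []) := by
  induction l with
  | nil =>
    intro m
    cases m <;> simp [splitMaxAux, splitAux, PySem.Chars.join_singleton]
  | cons c rest ih =>
    intro m
    cases m with
    | zero =>
      have h1 : 0 < (splitAux (c :: rest)).length :=
        List.length_pos_of_ne_nil (splitAux_ne_nil _)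
      simp [splitMaxAux, if_pos h1, join_splitAux]
    | succ m' =>
      simp only [splitMaxAux, splitAux]
      by_cases hc : c = '-'
      · subst hc
        rw [if_pos rfl, if_pos rfl, ih m']
        simp [List.take_succ_cons, List.drop_succ_cons]
      · rw [if_neg hc, if_neg hc, ih (m' + 1)]
        cases h2 : splitAux rest with
        | nil => exact absurd h2 (splitAux_ne_nil rest)
        | cons q t =>
          simp [List.modifyHead, List.take_succ_cons, List.drop_succ_cons]

-- prefix facts on dash-free pieces
theorem dashPrefix (w : List Char) : ∀ (q t : List Char), '-' ∉ w → '-' ∉ q →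
    ((w ++ ['-']) <+: (q ++ '-' :: t) ↔ w = q) := by
  induction w with
  | nil =>
    intro q t _ hq
    cases q with
    | nil => simp
    | cons d q' =>
      simp only [List.nil_append, List.cons_append, List.cons_prefix_cons]
      constructor
      · rintro ⟨h1, _⟩
        simp at hq
        exact absurd h1 hq.1
      · intro h; cases h
  | cons a w' ih =>
    intro q t hw hq
    cases q with
    | nil =>
      simp only [List.cons_append, List.nil_append, List.cons_prefix_cons]
      constructor
      · rintro ⟨h1, _⟩
        simp at hw
        exact absurd h1.symm hw.1
      · intro h; cases h
    | cons d q' =>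
      simp only [List.cons_append, List.cons_prefix_cons]
      have hw' : '-' ∉ w' := by simp at hw; exact hw.2
      have hq' : '-' ∉ q' := by simp at hq; exact hq.2
      rw [ih q' t hw' hq']
      constructor
      · rintro ⟨h1, h2⟩; rw [h1, h2]
      · intro h; injection h with h1 h2; exact ⟨h1, h2⟩

theorem noPrefix_single (w q : List Char) (hq : '-' ∉ q) : ¬ (w ++ ['-']) <+: q := by
  intro h
  exact hq (h.subset (by simp))

theorem advance_skip (q r : List Char) (t : List (List Char))
    (h : q = "clone".toList ∨ q = "mirror".toList) : advance (q :: r :: t) = advance (r :: t) := by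
  rw [advance, if_pos h]

theorem advance_stay (q r : List Char) (t : List (List Char))
    (h : ¬ (q = "clone".toList ∨ q = "mirror".toList)) : advance (q :: r :: t) = q :: r :: t := by
  rw [advance, if_neg h]

-- the core loop lemma: A's fixed-point loop on the joined tokens is the token walk
theorem core (n : Nat) : ∀ (qs : List (List Char)), qs.length ≤ n → qs ≠ [] →
    (∀ p ∈ qs, '-' ∉ p) →
    aStrip (PySem.Chars.join ['-'] qs) = PySem.Chars.join ['-'] (advance qs) := by
  induction n with
  | zero => intro qs h1 h2 _; cases qs <;> simp_all
  | succ n ih =>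
    intro qs hlen hne hdash
    cases qs with
    | nil => exact absurd rfl hne
    | cons q rest =>
      have hq : '-' ∉ q := hdash q List.mem_cons_self
      cases rest with
      | nil =>
        -- single token: neither prefix can match a dash-free token
        have hnc : ¬ PySem.Chars.startswith (PySem.Chars.join ['-'] [q]) "clone-".toList = true := by
          simp only [PySem.Chars.startswith_iff, PySem.Chars.join_singleton]
          exact fun h => noPrefix_single "clone".toList _ hq (by simpa using h)
        have hnm : ¬ PySem.Chars.startswith (PySem.Chars.join ['-'] [q]) "mirror-".toList = true := by
          simp only [PySem.Chars.startswith_iff, PySem.Chars.join_singleton]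
          exact fun h => noPrefix_single "mirror".toList _ hq (by simpa using h)
        rw [aStrip, dif_neg hnc, dif_neg hnm]
        simp [advance]
      | cons r t =>
        have hr : '-' ∉ r := hdash r (by simp)
        have hjoin : PySem.Chars.join ['-'] (q :: r :: t) =
            q ++ '-' :: PySem.Chars.join ['-'] (r :: t) := by
          simp [PySem.Chars.join, List.intercalate]
        have hclone : PySem.Chars.startswith (PySem.Chars.join ['-'] (q :: r :: t))
            "clone-".toList = true ↔ q = "clone".toList := by
          rw [PySem.Chars.startswith_iff, hjoin]
          have : "clone-".toList = "clone".toList ++ ['-'] := by decide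
          rw [this, dashPrefix "clone".toList q _ (by decide) hq]
          exact ⟨Eq.symm, Eq.symm⟩
        have hmirror : PySem.Chars.startswith (PySem.Chars.join ['-'] (q :: r :: t))
            "mirror-".toList = true ↔ q = "mirror".toList := by
          rw [PySem.Chars.startswith_iff, hjoin]
          have : "mirror-".toList = "mirror".toList ++ ['-'] := by decide
          rw [this, dashPrefix "mirror".toList q _ (by decide) hq]
          exact ⟨Eq.symm, Eq.symm⟩
        have hdrop6 : q = "clone".toList →
            PySem.Chars.slice (PySem.Chars.join ['-'] (q :: r :: t)) (some 6) none =
              PySem.Chars.join ['-'] (r :: t) := by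
          intro h; subst h
          rw [hjoin]
          have : PySem.Chars.slice ("clone".toList ++ '-' :: PySem.Chars.join ['-'] (r :: t))
              (some 6) none = List.drop 6 ("clone".toList ++ '-' :: PySem.Chars.join ['-'] (r :: t)) := by
            simpa [PySem.Chars.slice_eq_listSlice] using
              PySem.List.slice_from_natCast ("clone".toList ++ '-' :: PySem.Chars.join ['-'] (r :: t)) 6
          rw [this]
          rfl
        have hdrop7 : ∀ (s0 : List Char) (u : List (List Char)),
            PySem.Chars.slice (PySem.Chars.join ['-'] ("mirror".toList :: u)) (some 7) none =
              (if h : u = [] then [] else PySem.Chars.join ['-'] u) → True := fun _ _ _ => trivial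
        rw [aStrip]
        by_cases h1 : q = "clone".toList
        · rw [dif_pos (hclone.mpr h1)]
          rw [hdrop6 h1]
          have hrt_len : (r :: t).length ≤ n := by simpa using Nat.le_of_succ_le_succ hlen
          have hrt_dash : ∀ p ∈ r :: t, '-' ∉ p := fun p hp => hdash p (List.mem_cons_of_mem _ hp)
          by_cases h2 : PySem.Chars.startswith (PySem.Chars.join ['-'] (r :: t)) "mirror-".toList = true
          · -- mirror also strips inside the same body pass
            cases t with
            | nil =>
              exfalso
              have : ¬ ("mirror".toList ++ ['-']) <+: r := noPrefix_single _ _ hr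
              rw [PySem.Chars.startswith_iff] at h2
              simp only [PySem.Chars.join, List.intercalate] at h2
              exact this (by simpa using h2)
            | cons u t' =>
              have hr_mirror : r = "mirror".toList := by
                have hjoin2 : PySem.Chars.join ['-'] (r :: u :: t') =
                    r ++ '-' :: PySem.Chars.join ['-'] (u :: t') := by
                  simp [PySem.Chars.join, List.intercalate]
                rw [PySem.Chars.startswith_iff, hjoin2] at h2
                have hm : "mirror-".toList = "mirror".toList ++ ['-'] := by decide
                rw [hm, dashPrefix "mirror".toList r _ (by decide) hr] at h2
                exact h2.symm
              rw [dif_pos h2]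
              have hdropm : PySem.Chars.slice (PySem.Chars.join ['-'] (r :: u :: t')) (some 7) none =
                  PySem.Chars.join ['-'] (u :: t') := by
                subst hr_mirror
                have hjoin2 : PySem.Chars.join ['-'] ("mirror".toList :: u :: t') =
                    "mirror".toList ++ '-' :: PySem.Chars.join ['-'] (u :: t') := by
                  simp [PySem.Chars.join, List.intercalate]
                rw [hjoin2]
                have : PySem.Chars.slice ("mirror".toList ++ '-' :: PySem.Chars.join ['-'] (u :: t'))
                    (some 7) none =
                    List.drop 7 ("mirror".toList ++ '-' :: PySem.Chars.join ['-'] (u :: t')) := by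
                  simpa [PySem.Chars.slice_eq_listSlice] using
                    PySem.List.slice_from_natCast
                      ("mirror".toList ++ '-' :: PySem.Chars.join ['-'] (u :: t')) 7
                rw [this]
                rfl
              rw [hdropm]
              have := ih (u :: t') (by simp at hlen ⊢; omega)
                (by simp) (fun p hp => hdash p (by simp at hp ⊢; tauto))
              rw [this]
              rw [advance_skip _ _ _ (Or.inl h1), advance_skip _ _ _ (Or.inr hr_mirror)]
          · rw [dif_neg h2]
            rw [ih (r :: t) hrt_len (by simp) hrt_dash]
            rw [advance_skip _ _ _ (Or.inl h1)]
        · rw [dif_neg (by rw [hclone]; exact h1)]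
          by_cases h2 : q = "mirror".toList
          · rw [dif_pos (hmirror.mpr h2)]
            have hdropm : PySem.Chars.slice (PySem.Chars.join ['-'] (q :: r :: t)) (some 7) none =
                PySem.Chars.join ['-'] (r :: t) := by
              subst h2
              rw [hjoin]
              have : PySem.Chars.slice ("mirror".toList ++ '-' :: PySem.Chars.join ['-'] (r :: t))
                  (some 7) none =
                  List.drop 7 ("mirror".toList ++ '-' :: PySem.Chars.join ['-'] (r :: t)) := by
                simpa [PySem.Chars.slice_eq_listSlice] using
                  PySem.List.slice_from_natCast
                    ("mirror".toList ++ '-' :: PySem.Chars.join ['-'] (r :: t)) 7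
              rw [this]
              rfl
            rw [hdropm]
            rw [ih (r :: t) (by simpa using Nat.le_of_succ_le_succ hlen) (by simp)
              (fun p hp => hdash p (List.mem_cons_of_mem _ hp))]
            rw [advance_skip _ _ _ (Or.inr h2)]
          · rw [dif_neg (by rw [hmirror]; exact h2)]
            rw [advance_stay _ _ _ (by tauto)]

-- B's index walk realises 'advance' on the dropped token list
theorem walk (parts : List String) (k : Nat) : ∀ (i : Nat), i < parts.length →
    parts.length - i = k →
    (parts.drop (bWalk parts i)).map String.toList = advance ((parts.drop i).map String.toList) := by
  induction k with
  | zero => intro i h1 h2; omega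
  | succ k ih =>
    intro i hi hk
    have hdrop : parts.drop i = parts[i] :: parts.drop (i + 1) := List.drop_eq_getElem_cons hi
    rw [bWalk]
    by_cases hcond : (decide (i < parts.length - 1) &&
        (parts.getD i "" == "clone" || parts.getD i "" == "mirror")) = true
    · rw [if_pos hcond]
      simp only [Bool.and_eq_true, decide_eq_true_eq, Bool.or_eq_true, beq_iff_eq] at hcond
      obtain ⟨hlt, hcm⟩ := hcond
      rw [List.getD_eq_getElem _ _ hi] at hcm
      have hi1 : i + 1 < parts.length := by omega
      have hdrop1 : parts.drop (i + 1) = parts[i + 1] :: parts.drop (i + 2) :=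
        List.drop_eq_getElem_cons hi1
      have hcm' : parts[i].toList = "clone".toList ∨ parts[i].toList = "mirror".toList := by
        rcases hcm with h | h
        · exact Or.inl (by rw [h])
        · exact Or.inr (by rw [h])
      rw [ih (i + 1) hi1 (by omega)]
      conv_rhs => rw [hdrop, hdrop1, List.map_cons, List.map_cons]
      rw [advance_skip _ _ _ hcm', ← List.map_cons, ← hdrop1]
    · rw [if_neg hcond]
      simp only [Bool.and_eq_true, decide_eq_true_eq, Bool.or_eq_true, beq_iff_eq,
        not_and_or, not_or] at hcond
      rcases hcond with h | h
      · -- i = parts.length - 1 : last token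
        have : i = parts.length - 1 := by omega
        have hdrop_last : parts.drop (i + 1) = [] := by
          apply List.drop_eq_nil_of_le; omega
        rw [hdrop, hdrop_last]
        simp [advance]
      · -- token is neither "clone" nor "mirror"
        rw [hdrop]
        cases hd1 : parts.drop (i + 1) with
        | nil => simp [advance]
        | cons r t =>
          simp only [List.map_cons]
          rw [List.getD_eq_getElem _ _ hi] at h
          exact (advance_stay _ _ _ (by
            rintro (hh | hh)
            · exact h.1 (String.toList_inj.mp (by rw [hh]))
            · exact h.2 (String.toList_inj.mp (by rw [hh])))).symm

theorem dash_infix_iff (l : List Char) : ['-'] <:+: l ↔ '-' ∈ l := by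
  constructor
  · intro h; exact List.singleton_sublist.mp h.sublist
  · intro h
    obtain ⟨u, v, rfl⟩ := List.append_of_mem h
    exact ⟨u, v, by simp⟩

theorem splitAux_len_pos (l : List Char) : 0 < (splitAux l).length :=
  List.length_pos_of_ne_nil (splitAux_ne_nil l)

-- A's first line computes the join of the tokens after the first min 2 (n-1) ones
theorem suffixA (s : String) :
    (if PySem.Str.isIn "-" s = true then
      (PySem.List.pyGet? ((PySem.Str.splitMax? s "-" 2).getD []) (-1)).getD ""
    else s).toList
    = PySem.Chars.join ['-']
        ((splitAux s.toList).drop (min 2 ((splitAux s.toList).length - 1))) := by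
  have hIn : PySem.Str.isIn "-" s = true ↔ '-' ∈ s.toList := by
    rw [PySem.Str.isIn, show ("-" : String).toList = ['-'] from rfl]
    rw [PySem.Chars.isIn_iff_infix]
    exact dash_infix_iff s.toList
  by_cases hmem : '-' ∈ s.toList
  · rw [if_pos (hIn.mpr hmem)]
    have hn2 : 2 ≤ (splitAux s.toList).length := by
      rcases Nat.lt_or_ge (splitAux s.toList).length 2 with h | h
      · exfalso
        have h1 := splitAux_len_pos s.toList
        have h2 : (splitAux s.toList).length = 1 := by omega
        exact (length_splitAux_eq_one_iff s.toList).mp h2 hmem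
      · exact h
    have hsm : PySem.Str.splitMax? s "-" 2 =
        some ((splitMaxAux 2 s.toList).map String.ofList) := by
      rw [PySem.Str.splitMax?, PySem.Chars.splitMax?]
      rw [show ("-" : String).toList = ['-'] from rfl]
      rw [if_neg (by simp)]
      rw [splitOnMax_eq]
      rfl
    rw [hsm, Option.getD_some]
    rw [splitMaxAux_eq s.toList 2]
    cases h0 : splitAux s.toList with
    | nil => exact absurd h0 (splitAux_ne_nil s.toList)
    | cons p0 ps0 =>
      cases ps0 with
      | nil => rw [h0] at hn2; simp at hn2
      | cons p1 rest =>
        cases rest with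
        | nil =>
          -- exactly two tokens
          simp only [List.take_succ_cons, List.take_zero, List.length_cons, List.length_nil]
          rw [if_neg (by omega)]
          simp [PySem.List.pyGet?, PySem.List.pyIdx?, PySem.Chars.join_singleton]
        | cons p2 t =>
          -- three or more tokens
          simp only [List.take_succ_cons, List.take_zero, List.length_cons]
          rw [if_pos (by omega)]
          rw [show min 2 (t.length + 1 + 1 + 1 - 1) = 2 from by omega]
          simp [PySem.List.pyGet?, PySem.List.pyIdx?, List.drop_succ_cons]
  · rw [if_neg (fun h => hmem (hIn.mp h))]
    have hn1 : (splitAux s.toList).length = 1 := (length_splitAux_eq_one_iff s.toList).mpr hmem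
    rw [hn1]
    simp [join_splitAux]

-- ===== VERDICT (by name: the statement is the Claim_ definition above) =====
theorem infer_archetype_py_spec : Claim_equal_infer_archetype_py := by
  intro s _
  unfold Spec_infer_archetype_py
  simp only [infer_archetype_py, infer_archetype_py_alt]
  apply String.toList_inj.mp
  -- abbreviations
  set l := s.toList with hl
  set ps := splitAux l with hps
  have hn : 0 < ps.length := splitAux_len_pos l
  set i0 := min 2 (ps.length - 1) with hi0
  have hi0lt : i0 < ps.length := by omega
  -- the token list of B's port
  have hparts : (PySem.Str.split? s "-").getD [] = ps.map String.ofList := by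
    rw [PySem.Str.split?, PySem.Chars.split?]
    rw [show ("-" : String).toList = ['-'] from rfl]
    rw [if_neg (by simp)]
    rw [splitOn_eq]
    rfl
  have hplen : (ps.map String.ofList).length = ps.length := List.length_map ..
  -- A's side
  have hA : (String.ofList (aStrip ((if PySem.Str.isIn "-" s = true then
      (PySem.List.pyGet? ((PySem.Str.splitMax? s "-" 2).getD []) (-1)).getD ""
    else s)).toList)).toList = PySem.Chars.join ['-'] (advance (ps.drop i0)) := by
    rw [String.toList_ofList, suffixA s]
    exact core (ps.drop i0).length (ps.drop i0) le_rfl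
      (by
        intro hnil
        rw [List.drop_eq_nil_iff] at hnil
        omega)
      (fun p hp => mem_splitAux_no_dash l p (List.mem_of_mem_drop hp))
  rw [hA]
  -- B's side
  rw [hparts, hplen]
  have hslice : ∀ (j : Nat) (xs : List String),
      PySem.List.slice xs (some (j : Int)) none = xs.drop j :=
    fun j xs => PySem.List.slice_from_natCast xs j
  rw [hslice]
  rw [PySem.Str.toList_join]
  rw [show ("-" : String).toList = ['-'] from rfl]
  rw [← hi0]
  have hdm2 : ∀ (j : Nat), ((ps.map String.ofList).drop j).map String.toList = ps.drop j := by
    intro j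
    rw [← List.map_drop]
    simp [List.map_map, Function.comp_def]
  have hwalk := walk (ps.map String.ofList) ((ps.map String.ofList).length - i0) i0
    (by rw [hplen]; exact hi0lt) rfl
  rw [hdm2, hdm2] at hwalk
  rw [hdm2, hwalk]
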